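-- pv_equiv track=rewrite | github.com/reservoirgenomics/rhodius | clodius/tiles/bam.py | get_cigar_substitutions
-- ===== SOURCE A (Python) =====
-- def get_cigar_substitutions(pos, query_length, cigartuples):
--     subs = []
--     curr_pos = 0
--
--     cigartuples = cigartuples
--     readstart = pos
--     readend = pos + query_length
--
--     for ctuple in cigartuples:
--         if ctuple[0] == "X":
--             subs.append((readstart + curr_pos, "X", ctuple[1]))
--             curr_pos += ctuple[1]
--         elif ctuple[0] == "I":
--             subs.append((readstart + curr_pos, "I", ctuple[1]))
--         elif ctuple[0] == "D":
--             subs.append((readstart + curr_pos, "D", ctuple[1]))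
--             curr_pos += ctuple[1]
--         elif ctuple[0] == "N":
--             subs.append((readstart + curr_pos, "N", ctuple[1]))
--             curr_pos += ctuple[1]
--         elif ctuple[0] == "M" or ctuple[0] == "=":
--             curr_pos += ctuple[1]
--
--     if len(cigartuples):
--         first_ctuple = cigartuples[0]
--         last_ctuple = cigartuples[-1]
--
--         if first_ctuple[0] == "S":
--             subs.append((readstart - first_ctuple[1], "S", first_ctuple[1]))
--         if first_ctuple[0] == "H":
--             subs.append((readstart - first_ctuple[1], "H", first_ctuple[1]))
--
--         if last_ctuple[0] == "S":
--             subs.append((readend - last_ctuple[1], "S", last_ctuple[1]))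
--         if last_ctuple[0] == "H":
--             subs.append((readend, "H", last_ctuple[1]))
--
--     return subs
-- ===== SOURCE B (Python) =====
-- def get_cigar_substitutions(pos, query_length, cigartuples):
--     # Pass 1: exclusive prefix sums of reference-advancing lengths (ops M/=/X/D/N).
--     offsets = []
--     total = 0
--     for op, ln in cigartuples:
--         offsets.append(total)
--         if op in ("M", "=", "X", "D", "N"):
--             total += ln
--     # Pass 2: emit substitution/indel records at their precomputed offsets.
--     subs = [(pos + off, op, ln)
--             for off, (op, ln) in zip(offsets, cigartuples)
--             if op in ("X", "I", "D", "N")]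
--     # Clip records for the first and last cigar tuples.
--     if cigartuples:
--         readend = pos + query_length
--         fop, fln = cigartuples[0]
--         lop, lln = cigartuples[-1]
--         if fop in ("S", "H"):
--             subs.append((pos - fln, fop, fln))
--         if lop == "S":
--             subs.append((readend - lln, "S", lln))
--         elif lop == "H":
--             subs.append((readend, "H", lln))
--     return subs
-- ===== Notes on version B (the rewrite author's own statement) =====
-- stated objective: alternative
-- what changed: Replaces the single stateful loop carrying (subs, curr_pos) with a two-phase decomposition: first an exclusive prefix-sum table of per-tuple reference offsets, then a comprehension over zip(offsets, cigartuples) that emits records, with the clip handling reading first/last tuples once.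
import Mathlib
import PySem

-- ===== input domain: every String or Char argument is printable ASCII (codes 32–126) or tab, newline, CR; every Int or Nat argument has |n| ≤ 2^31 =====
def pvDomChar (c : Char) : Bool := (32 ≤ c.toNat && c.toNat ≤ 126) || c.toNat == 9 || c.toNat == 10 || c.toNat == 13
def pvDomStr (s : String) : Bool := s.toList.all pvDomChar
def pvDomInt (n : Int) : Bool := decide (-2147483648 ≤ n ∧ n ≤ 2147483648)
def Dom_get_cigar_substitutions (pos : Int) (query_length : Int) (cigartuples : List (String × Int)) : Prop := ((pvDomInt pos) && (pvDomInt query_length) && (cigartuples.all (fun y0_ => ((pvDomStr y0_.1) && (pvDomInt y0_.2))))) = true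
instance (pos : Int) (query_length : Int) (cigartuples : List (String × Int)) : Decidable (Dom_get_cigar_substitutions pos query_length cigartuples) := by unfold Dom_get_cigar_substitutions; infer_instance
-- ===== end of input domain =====

-- B replaces A's single stateful (subs, curr_pos) loop by a two-phase decomposition
-- (exclusive prefix-sum offset table, then an emission pass over zip(offsets, tuples));
-- objective: alternative structure, same O(n) cost, same return value.


-- ===== PORT A =====
-- one iteration of A's for-loop: state is (subs, curr_pos)
def pvStepA (readstart : Int) (st : List (Int × String × Int) × Int) (t : String × Int) :
    List (Int × String × Int) × Int :=
  if t.1 = "X" then (st.1 ++ [(readstart + st.2, "X", t.2)], st.2 + t.2)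
  else if t.1 = "I" then (st.1 ++ [(readstart + st.2, "I", t.2)], st.2)
  else if t.1 = "D" then (st.1 ++ [(readstart + st.2, "D", t.2)], st.2 + t.2)
  else if t.1 = "N" then (st.1 ++ [(readstart + st.2, "N", t.2)], st.2 + t.2)
  else if t.1 = "M" ∨ t.1 = "=" then (st.1, st.2 + t.2)
  else st

def get_cigar_substitutions (pos : Int) (query_length : Int) (cigartuples : List (String × Int)) : List (Int × String × Int) :=
  let readstart := pos
  let readend := pos + query_length
  let st := cigartuples.foldl (pvStepA readstart) ([], 0)
  match cigartuples with
  | [] => st.1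
  | f :: rest =>
    -- len(cigartuples) nonzero: cigartuples[0] = f, cigartuples[-1] = getLast
    let l := (f :: rest).getLast (by simp)
    let s1 := if f.1 = "S" then st.1 ++ [(readstart - f.2, "S", f.2)] else st.1
    let s2 := if f.1 = "H" then s1 ++ [(readstart - f.2, "H", f.2)] else s1
    let s3 := if l.1 = "S" then s2 ++ [(readend - l.2, "S", l.2)] else s2
    if l.1 = "H" then s3 ++ [(readend, "H", l.2)] else s3

-- ===== PORT B =====
-- does this op advance the reference position?
def pvAdvB (op : String) : Bool := op = "M" || op = "=" || op = "X" || op = "D" || op = "N"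

-- pass 1: exclusive prefix sums of reference-advancing lengths
def pvOffsetsB (tot : Int) : List (String × Int) → List Int
  | [] => []
  | t :: rest => tot :: pvOffsetsB (if pvAdvB t.1 then tot + t.2 else tot) rest

-- pass 2's per-pair emitter
def pvEmitB (pos : Int) (x : Int × String × Int) : Option (Int × String × Int) :=
  if x.2.1 = "X" || x.2.1 = "I" || x.2.1 = "D" || x.2.1 = "N" then some (pos + x.1, x.2.1, x.2.2) else none

def get_cigar_substitutions_alt (pos : Int) (query_length : Int) (cigartuples : List (String × Int)) : List (Int × String × Int) :=
  let offs := pvOffsetsB 0 cigartuples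
  let subs := (offs.zip cigartuples).filterMap (pvEmitB pos)
  match cigartuples with
  | [] => subs
  | f :: rest =>
    let readend := pos + query_length
    let l := (f :: rest).getLast (by simp)
    let s1 := if f.1 = "S" || f.1 = "H" then subs ++ [(pos - f.2, f.1, f.2)] else subs
    if l.1 = "S" then s1 ++ [(readend - l.2, "S", l.2)]
    else if l.1 = "H" then s1 ++ [(readend, "H", l.2)]
    else s1

-- ===== PRECONDITION & SPEC =====
def Spec_get_cigar_substitutions (pos : Int) (query_length : Int) (cigartuples : List (String × Int)) (out : List (Int × String × Int)) : Prop := out = get_cigar_substitutions_alt pos query_length cigartuples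
instance (pos : Int) (query_length : Int) (cigartuples : List (String × Int)) (out : List (Int × String × Int)) : Decidable (Spec_get_cigar_substitutions pos query_length cigartuples out) := by unfold Spec_get_cigar_substitutions; infer_instance

-- ===== CLAIM (what is proved, stated in full; the proofs are below) =====
def Claim_equal_get_cigar_substitutions : Prop := ∀ (pos : Int) (query_length : Int) (cigartuples : List (String × Int)), Dom_get_cigar_substitutions pos query_length cigartuples → Spec_get_cigar_substitutions pos query_length cigartuples (get_cigar_substitutions pos query_length cigartuples)

-- ===== LEMMAS AND PROOFS =====

-- A's loop, started at any accumulated subs/curr_pos, produces exactly the records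
-- emitted from B's exclusive prefix-sum table started at the same curr_pos.
theorem pvFoldA_eq (pos : Int) (cts : List (String × Int)) :
    ∀ (subs : List (Int × String × Int)) (tot : Int),
      (cts.foldl (pvStepA pos) (subs, tot)).1
        = subs ++ ((pvOffsetsB tot cts).zip cts).filterMap (pvEmitB pos) := by
  induction cts with
  | nil => intro subs tot; simp [pvOffsetsB]
  | cons t rest ih =>
    intro subs tot
    obtain ⟨op, ln⟩ := t
    by_cases h1 : op = "X"
    · simp [pvStepA, pvOffsetsB, pvAdvB, pvEmitB, h1, ih]
    · by_cases h2 : op = "I"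
      · simp [pvStepA, pvOffsetsB, pvAdvB, pvEmitB, h2, ih]
      · by_cases h3 : op = "D"
        · simp [pvStepA, pvOffsetsB, pvAdvB, pvEmitB, h3, ih]
        · by_cases h4 : op = "N"
          · simp [pvStepA, pvOffsetsB, pvAdvB, pvEmitB, h4, ih]
          · by_cases h5 : op = "M"
            · simp [pvStepA, pvOffsetsB, pvAdvB, pvEmitB, h5, ih]
            · by_cases h6 : op = "="
              · simp [pvStepA, pvOffsetsB, pvAdvB, pvEmitB, h6, ih]
              · simp [pvStepA, pvOffsetsB, pvAdvB, pvEmitB, h1, h2, h3, h4, h5, h6, ih]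

-- ===== VERDICT (by name: the statement is the Claim_ definition above) =====
theorem get_cigar_substitutions_spec : Claim_equal_get_cigar_substitutions := by
  intro pos ql cts _
  show _ = _
  unfold get_cigar_substitutions get_cigar_substitutions_alt
  cases cts with
  | nil => simp
  | cons f rest =>
    simp only [pvFoldA_eq, List.nil_append]
    by_cases hS : f.1 = "S" <;> by_cases hH : f.1 = "H" <;>
      by_cases lS : ((f :: rest).getLast (by simp)).1 = "S" <;>
      by_cases lH : ((f :: rest).getLast (by simp)).1 = "H" <;>
      simp_all
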